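-- pv_equiv track=rewrite | github.com/wjx-git/DepTriggerNER | conll_dataset.py | second_trigger
-- ===== SOURCE A (Python) =====
-- remove = ['ROOT', 'punct']
--
-- def second_trigger(first_trigger, deprel, entity):
--     second_stage = []
--     for ind in first_trigger:
--         for dep in deprel:
--             if dep[0] not in remove:
--                 if ind[0] == dep[1]-1 and dep[2]-1 not in entity:
--                     second_stage.append((dep[2]-1, ind[-1]))
--                 if ind[0] == dep[2]-1 and dep[1]-1 not in entity:
--                     second_stage.append((dep[1]-1, ind[-1]))
--     return second_stage
-- ===== SOURCE B (Python) =====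
-- remove = ['ROOT', 'punct']
--
-- def second_trigger(first_trigger, deprel, entity):
--     ents = set(entity)
--     edges = []
--     for rel, a, b in deprel:
--         if rel not in remove:
--             h, t = a - 1, b - 1
--             if t not in ents:
--                 edges.append((h, t))
--             if h not in ents:
--                 edges.append((t, h))
--     idx = {}
--     for k, t in edges:
--         idx[k] = idx.get(k, []) + [t]
--     return [(t, ind[-1]) for ind in first_trigger for t in idx.get(ind[0], [])]
-- ===== Notes on version B (the rewrite author's own statement) =====
-- stated objective: faster
-- what changed: B precomputes the entity set and a dict mapping each endpoint-1 to its list of partner endpoints in one pass over deprel, then answers each first_trigger item by a single dict lookup, instead of A's rescan of deprel (with list membership tests in entity) for every first_trigger item.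
import Mathlib
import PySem

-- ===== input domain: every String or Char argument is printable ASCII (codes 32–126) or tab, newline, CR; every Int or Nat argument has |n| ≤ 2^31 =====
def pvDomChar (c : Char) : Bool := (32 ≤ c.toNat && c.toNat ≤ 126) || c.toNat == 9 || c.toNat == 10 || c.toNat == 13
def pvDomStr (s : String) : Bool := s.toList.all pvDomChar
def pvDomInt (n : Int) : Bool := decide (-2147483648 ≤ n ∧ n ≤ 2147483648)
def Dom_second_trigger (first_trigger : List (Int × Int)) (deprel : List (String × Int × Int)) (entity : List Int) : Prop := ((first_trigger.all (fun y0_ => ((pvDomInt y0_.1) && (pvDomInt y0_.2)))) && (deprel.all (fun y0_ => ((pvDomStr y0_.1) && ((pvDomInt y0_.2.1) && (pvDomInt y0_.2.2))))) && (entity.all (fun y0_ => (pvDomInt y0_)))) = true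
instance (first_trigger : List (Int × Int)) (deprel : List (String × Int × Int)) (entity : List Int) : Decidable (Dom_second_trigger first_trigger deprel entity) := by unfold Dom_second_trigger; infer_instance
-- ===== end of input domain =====

-- B indexes deprel once by (endpoint-1) into a dict and precomputes the entity set,
-- replacing A's rescan of deprel per first_trigger item: asymptotically faster, same output.

-- ===== PORT A =====
def second_trigger (first_trigger : List (Int × Int)) (deprel : List (String × Int × Int)) (entity : List Int) : List (Int × Int) :=
  first_trigger.foldl (fun acc ind =>
    deprel.foldl (fun acc dep =>
      if dep.1 ∈ (["ROOT", "punct"] : List String) then acc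
      else
        let acc := if ind.1 = dep.2.1 - 1 ∧ dep.2.2 - 1 ∉ entity then acc ++ [(dep.2.2 - 1, ind.2)] else acc
        if ind.1 = dep.2.2 - 1 ∧ dep.2.1 - 1 ∉ entity then acc ++ [(dep.2.1 - 1, ind.2)] else acc) acc) []

-- ===== PORT B =====
def second_trigger_alt (first_trigger : List (Int × Int)) (deprel : List (String × Int × Int)) (entity : List Int) : List (Int × Int) :=
  let ents : PySem.Set Int := PySem.Set.ofList entity
  let edges : List (Int × Int) := deprel.foldl (fun acc dep =>
    if dep.1 ∈ (["ROOT", "punct"] : List String) then acc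
    else
      let h := dep.2.1 - 1
      let t := dep.2.2 - 1
      let acc := if ents.contains t then acc else acc ++ [(h, t)]
      if ents.contains h then acc else acc ++ [(t, h)]) []
  let idx : PySem.Dict Int (List Int) := edges.foldl (fun d p => d.modify p.1 [] (· ++ [p.2])) PySem.Dict.empty
  first_trigger.flatMap (fun ind => (idx.getD ind.1 []).map (fun t => (t, ind.2)))

-- ===== PRECONDITION & SPEC =====
def Spec_second_trigger (first_trigger : List (Int × Int)) (deprel : List (String × Int × Int)) (entity : List Int) (out : List (Int × Int)) : Prop := out = second_trigger_alt first_trigger deprel entity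
instance (first_trigger : List (Int × Int)) (deprel : List (String × Int × Int)) (entity : List Int) (out : List (Int × Int)) : Decidable (Spec_second_trigger first_trigger deprel entity out) := by unfold Spec_second_trigger; infer_instance

-- ===== CLAIM (what is proved, stated in full; the proofs are below) =====
def Claim_equal_second_trigger : Prop := ∀ (first_trigger : List (Int × Int)) (deprel : List (String × Int × Int)) (entity : List Int), Dom_second_trigger first_trigger deprel entity → Spec_second_trigger first_trigger deprel entity (second_trigger first_trigger deprel entity)

-- ===== LEMMAS AND PROOFS =====

-- per-dep contribution of A's inner loop for a fixed first-trigger item ind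
def contribA (entity : List Int) (ind : Int × Int) (dep : String × Int × Int) : List (Int × Int) :=
  if dep.1 ∈ (["ROOT", "punct"] : List String) then []
  else (if ind.1 = dep.2.1 - 1 ∧ dep.2.2 - 1 ∉ entity then [(dep.2.1 - 1, dep.2.2 - 1)].map (fun p => (p.2, ind.2)) else []) ++
       (if ind.1 = dep.2.2 - 1 ∧ dep.2.1 - 1 ∉ entity then [(dep.2.2 - 1, dep.2.1 - 1)].map (fun p => (p.2, ind.2)) else [])

-- per-dep contribution of B's edge-building loop
def contribB (entity : List Int) (dep : String × Int × Int) : List (Int × Int) :=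
  if dep.1 ∈ (["ROOT", "punct"] : List String) then []
  else (if (PySem.Set.ofList entity).contains (dep.2.2 - 1) then [] else [(dep.2.1 - 1, dep.2.2 - 1)]) ++
       (if (PySem.Set.ofList entity).contains (dep.2.1 - 1) then [] else [(dep.2.2 - 1, dep.2.1 - 1)])

lemma A_flatMap (first_trigger : List (Int × Int)) (deprel : List (String × Int × Int)) (entity : List Int) :
    second_trigger first_trigger deprel entity =
      first_trigger.flatMap (fun ind => deprel.flatMap (contribA entity ind)) := by
  unfold second_trigger
  calc first_trigger.foldl (fun acc ind =>
        deprel.foldl (fun acc dep =>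
          if dep.1 ∈ (["ROOT", "punct"] : List String) then acc
          else
            let acc := if ind.1 = dep.2.1 - 1 ∧ dep.2.2 - 1 ∉ entity then acc ++ [(dep.2.2 - 1, ind.2)] else acc
            if ind.1 = dep.2.2 - 1 ∧ dep.2.1 - 1 ∉ entity then acc ++ [(dep.2.1 - 1, ind.2)] else acc) acc) []
      = first_trigger.foldl (fun acc ind => acc ++ deprel.flatMap (contribA entity ind)) [] := by
        apply PySem.List.foldl_congr_mem
        intro acc ind _
        calc deprel.foldl (fun acc dep =>
              if dep.1 ∈ (["ROOT", "punct"] : List String) then acc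
              else
                let acc := if ind.1 = dep.2.1 - 1 ∧ dep.2.2 - 1 ∉ entity then acc ++ [(dep.2.2 - 1, ind.2)] else acc
                if ind.1 = dep.2.2 - 1 ∧ dep.2.1 - 1 ∉ entity then acc ++ [(dep.2.1 - 1, ind.2)] else acc) acc
            = deprel.foldl (fun acc dep => acc ++ contribA entity ind dep) acc := by
              apply PySem.List.foldl_congr_mem
              intro acc dep _
              simp only [contribA]
              split_ifs <;> simp
          _ = acc ++ deprel.flatMap (contribA entity ind) := PySem.List.foldl_append_eq_flatMap ..
    _ = [] ++ first_trigger.flatMap (fun ind => deprel.flatMap (contribA entity ind)) :=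
        PySem.List.foldl_append_eq_flatMap ..
    _ = first_trigger.flatMap (fun ind => deprel.flatMap (contribA entity ind)) := List.nil_append _

lemma B_edges (deprel : List (String × Int × Int)) (entity : List Int) :
    (deprel.foldl (fun acc dep =>
      if dep.1 ∈ (["ROOT", "punct"] : List String) then acc
      else
        let h := dep.2.1 - 1
        let t := dep.2.2 - 1
        let acc := if (PySem.Set.ofList entity).contains t then acc else acc ++ [(h, t)]
        if (PySem.Set.ofList entity).contains h then acc else acc ++ [(t, h)]) []) =
    deprel.flatMap (contribB entity) := by
  calc deprel.foldl (fun acc dep =>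
        if dep.1 ∈ (["ROOT", "punct"] : List String) then acc
        else
          let h := dep.2.1 - 1
          let t := dep.2.2 - 1
          let acc := if (PySem.Set.ofList entity).contains t then acc else acc ++ [(h, t)]
          if (PySem.Set.ofList entity).contains h then acc else acc ++ [(t, h)]) []
      = deprel.foldl (fun acc dep => acc ++ contribB entity dep) [] := by
        apply PySem.List.foldl_congr_mem
        intro acc dep _
        simp only [contribB]
        split_ifs <;> simp
    _ = [] ++ deprel.flatMap (contribB entity) := PySem.List.foldl_append_eq_flatMap ..
    _ = deprel.flatMap (contribB entity) := List.nil_append _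

lemma contrib_key (entity : List Int) (ind : Int × Int) (dep : String × Int × Int) :
    contribA entity ind dep =
      ((contribB entity dep).filter (fun p => p.1 == ind.1)).map (fun p => (p.2, ind.2)) := by
  simp only [contribA, contribB]
  by_cases hr : dep.1 ∈ (["ROOT", "punct"] : List String)
  · simp [hr]
  · simp only [hr, if_false, List.filter_append, List.map_append]
    congr 1
    · by_cases h2 : dep.2.2 - 1 ∈ entity
      · simp [h2, PySem.Set.mem_ofList]
      · by_cases h1 : ind.1 = dep.2.1 - 1 <;> simp [h1, h2] <;> omega
    · by_cases h4 : dep.2.1 - 1 ∈ entity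
      · simp [h4, PySem.Set.mem_ofList]
      · by_cases h3 : ind.1 = dep.2.2 - 1 <;> simp [h3, h4] <;> omega

lemma inner_eq (entity : List Int) (ind : Int × Int) (deprel : List (String × Int × Int)) :
    deprel.flatMap (contribA entity ind) =
      ((deprel.flatMap (contribB entity)).filter (fun p => p.1 == ind.1)).map (fun p => (p.2, ind.2)) := by
  induction deprel with
  | nil => rfl
  | cons d ds ih =>
      simp only [List.flatMap_cons, List.filter_append, List.map_append]
      rw [contrib_key, ih]

-- ===== VERDICT (by name: the statement is the Claim_ definition above) =====
theorem second_trigger_spec : Claim_equal_second_trigger := by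
  intro first_trigger deprel entity _
  unfold Spec_second_trigger
  simp only [second_trigger_alt]
  rw [A_flatMap, B_edges]
  simp only [PySem.Dict.getD_foldl_modify_append, PySem.Dict.getD_empty, List.nil_append]
  congr 1
  funext ind
  rw [inner_eq, List.map_map]
  rfl
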